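-- pv_equiv track=rewrite | github.com/JeanPhilipLalumiere/MCGT | tools/heal_unexpected_indent_from_first.py | prepass_toplevel
-- ===== SOURCE A (Python) =====
-- TRIGS_SAFE_TOP = (
--     "import ", "from ", "def ", "class ",
--     "parser.add_argument(", "parser.set_defaults(", "args = parser.parse_args(", "parser = argparse.ArgumentParser("
-- )
--
-- def prev_nonempty(lines, i):
--     j = i - 1
--     while j >= 0 and lines[j].strip() == "":
--         j -= 1
--     return j
--
-- def line_opens_block(s: str) -> bool:
--     s = s.rstrip()
--     return s.endswith(":") and not s.lstrip().startswith("#")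
--
-- def prepass_toplevel(lines) -> int:
--     changed = 0
--     cap = min(len(lines), 140)  # zone "header"
--     for i in range(cap):
--         raw = lines[i]
--         if raw[:1].isspace():
--             ls = raw.lstrip()
--             if any(ls.startswith(t) for t in TRIGS_SAFE_TOP):
--                 j = prev_nonempty(lines, i)
--                 prev = lines[j] if j >= 0 else ""
--                 if not line_opens_block(prev):
--                     if ls != raw:
--                         lines[i] = ls
--                         changed += 1
--     return changed
-- ===== SOURCE B (Python) =====
-- TRIGS_SAFE_TOP = (
--     "import ", "from ", "def ", "class ",
--     "parser.add_argument(", "parser.set_defaults(", "args = parser.parse_args(", "parser = argparse.ArgumentParser("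
-- )
--
-- def _opens_block(s):
--     s = s.rstrip()
--     return s.endswith(":") and not s.lstrip().startswith("#")
--
-- def prepass_toplevel(lines) -> int:
--     # one forward pass: thread the content of the most recent non-empty line
--     changed = 0
--     prev = ""
--     for i in range(min(len(lines), 140)):
--         raw = lines[i]
--         if raw[:1].isspace():
--             ls = raw.lstrip()
--             if any(ls.startswith(t) for t in TRIGS_SAFE_TOP) and not _opens_block(prev):
--                 if ls != raw:
--                     lines[i] = ls
--                     changed += 1
--         cur = lines[i]
--         if cur.strip() != "":
--             prev = cur
--     return changed
-- ===== Notes on version B (the rewrite author's own statement) =====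
-- stated objective: alternative
-- what changed: Replaced the backward-scanning prev_nonempty helper (re-scanned before every triggered line) by a single forward pass that threads the most recent non-empty line's content as an accumulator, so the helper disappears.
import Mathlib
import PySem

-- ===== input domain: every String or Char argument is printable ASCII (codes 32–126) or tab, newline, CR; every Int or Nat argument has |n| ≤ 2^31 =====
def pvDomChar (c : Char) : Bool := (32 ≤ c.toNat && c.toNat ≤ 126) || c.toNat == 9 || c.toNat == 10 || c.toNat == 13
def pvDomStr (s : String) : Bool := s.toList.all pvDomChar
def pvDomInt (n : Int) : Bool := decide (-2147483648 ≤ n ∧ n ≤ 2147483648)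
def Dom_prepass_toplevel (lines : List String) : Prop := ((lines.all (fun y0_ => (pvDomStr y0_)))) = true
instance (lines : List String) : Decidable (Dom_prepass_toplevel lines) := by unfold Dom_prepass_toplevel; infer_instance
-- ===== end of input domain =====

-- B replaces A's backward-scanning prev_nonempty helper by a single forward pass that
-- threads the most recent non-empty line's content as an accumulator (objective: alternative
-- decomposition). Both A and B mutate `lines` in place identically; the equivalence proved
-- here is about the RETURN value.

-- ===== PORT A =====
def trigsSafeTop : List String :=
  ["import ", "from ", "def ", "class ",
   "parser.add_argument(", "parser.set_defaults(", "args = parser.parse_args(", "parser = argparse.ArgumentParser("]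

def lineOpensBlock (s : String) : Bool :=
  let s' := PySem.Str.rstrip s
  PySem.Str.endswith s' ":" && !(PySem.Str.startswith (PySem.Str.lstrip s') "#")

-- while j >= 0 and lines[j].strip() == "": j -= 1   (the indices A reads are always in range)
def prevNonemptyAux (lines : List String) (j : Int) : Int :=
  if h : 0 ≤ j ∧ PySem.Str.strip (PySem.List.pyGetD lines j "") = "" then
    prevNonemptyAux lines (j - 1)
  else j
termination_by (j + 1).toNat
decreasing_by omega

def aLoop (cap : Nat) (i : Nat) (lines : List String) (changed : Int) : List String × Int :=
  if i < cap then
    let raw := PySem.List.pyGetD lines (i : Int) ""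
    let st :=
      if PySem.Str.strIsspace (PySem.Str.slice raw none (some 1)) then
        let ls := PySem.Str.lstrip raw
        if trigsSafeTop.any (fun t => PySem.Str.startswith ls t) then
          let j := prevNonemptyAux lines ((i : Int) - 1)
          let prev := if 0 ≤ j then PySem.List.pyGetD lines j "" else ""
          if ¬ lineOpensBlock prev then
            if ls ≠ raw then (PySem.List.pySetD lines (i : Int) ls, changed + 1)
            else (lines, changed)
          else (lines, changed)
        else (lines, changed)
      else (lines, changed)
    aLoop cap (i + 1) st.1 st.2
  else (lines, changed)
termination_by cap - i

def prepass_toplevel (lines : List String) : Int :=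
  (aLoop (min lines.length 140) 0 lines 0).2

-- ===== PORT B =====
def bLoop (cap : Nat) (i : Nat) (lines : List String) (changed : Int) (prev : String) : Int :=
  if i < cap then
    let raw := PySem.List.pyGetD lines (i : Int) ""
    let st :=
      if PySem.Str.strIsspace (PySem.Str.slice raw none (some 1)) then
        let ls := PySem.Str.lstrip raw
        if (trigsSafeTop.any (fun t => PySem.Str.startswith ls t)) && !(lineOpensBlock prev) then
          if ls ≠ raw then (PySem.List.pySetD lines (i : Int) ls, changed + 1)
          else (lines, changed)
        else (lines, changed)
      else (lines, changed)
    let cur := PySem.List.pyGetD st.1 (i : Int) ""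
    let prev' := if PySem.Str.strip cur ≠ "" then cur else prev
    bLoop cap (i + 1) st.1 st.2 prev'
  else changed
termination_by cap - i

def prepass_toplevel_alt (lines : List String) : Int :=
  bLoop (min lines.length 140) 0 lines 0 ""

-- ===== PRECONDITION & SPEC =====
def Spec_prepass_toplevel (lines : List String) (out : Int) : Prop := out = prepass_toplevel_alt lines
instance (lines : List String) (out : Int) : Decidable (Spec_prepass_toplevel lines out) := by unfold Spec_prepass_toplevel; infer_instance

-- ===== CLAIM (what is proved, stated in full; the proofs are below) =====
def Claim_equal_prepass_toplevel : Prop := ∀ (lines : List String), Dom_prepass_toplevel lines → Spec_prepass_toplevel lines (prepass_toplevel lines)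

-- ===== LEMMAS AND PROOFS =====

-- the string A reads as "the previous non-empty line" before index i
def prevStr (lines : List String) (i : Nat) : String :=
  if 0 ≤ prevNonemptyAux lines ((i : Int) - 1) then
    PySem.List.pyGetD lines (prevNonemptyAux lines ((i : Int) - 1)) "" else ""

-- A's per-iteration state update (definitionally the zeta-reduced body of aLoop)
def stepA (L : List String) (c : Int) (i : Nat) : List String × Int :=
  if PySem.Str.strIsspace (PySem.Str.slice (PySem.List.pyGetD L (i : Int) "") none (some 1)) then
    if trigsSafeTop.any (fun t => PySem.Str.startswith (PySem.Str.lstrip (PySem.List.pyGetD L (i : Int) "")) t) then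
      if ¬ lineOpensBlock (prevStr L i) then
        if PySem.Str.lstrip (PySem.List.pyGetD L (i : Int) "") ≠ PySem.List.pyGetD L (i : Int) "" then
          (PySem.List.pySetD L (i : Int) (PySem.Str.lstrip (PySem.List.pyGetD L (i : Int) "")), c + 1)
        else (L, c)
      else (L, c)
    else (L, c)
  else (L, c)

-- B's per-iteration state update (definitionally the zeta-reduced pair in bLoop)
def stepB (L : List String) (c : Int) (i : Nat) (prev : String) : List String × Int :=
  if PySem.Str.strIsspace (PySem.Str.slice (PySem.List.pyGetD L (i : Int) "") none (some 1)) then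
    if (trigsSafeTop.any (fun t => PySem.Str.startswith (PySem.Str.lstrip (PySem.List.pyGetD L (i : Int) "")) t)) && !(lineOpensBlock prev) then
      if PySem.Str.lstrip (PySem.List.pyGetD L (i : Int) "") ≠ PySem.List.pyGetD L (i : Int) "" then
        (PySem.List.pySetD L (i : Int) (PySem.Str.lstrip (PySem.List.pyGetD L (i : Int) "")), c + 1)
      else (L, c)
    else (L, c)
  else (L, c)

lemma step_agree (L : List String) (c : Int) (i : Nat) :
    stepB L c i (prevStr L i) = stepA L c i := by
  unfold stepA stepB
  cases hA : trigsSafeTop.any (fun t => PySem.Str.startswith (PySem.Str.lstrip (PySem.List.pyGetD L (i : Int) "")) t) <;>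
    cases hB : lineOpensBlock (prevStr L i) <;> simp_all

lemma stepA_fst (L : List String) (c : Int) (i : Nat) :
    (stepA L c i).1 = L ∨ (stepA L c i).1 = L.set i (PySem.Str.lstrip (PySem.List.pyGetD L (i : Int) "")) := by
  unfold stepA
  split_ifs <;> simp

lemma pyGetD_set_lt (L : List String) (k : Nat) (x : String) (j : Int)
    (h0 : 0 ≤ j) (hj : j < (k : Int)) :
    PySem.List.pyGetD (L.set k x) j "" = PySem.List.pyGetD L j "" := by
  rw [PySem.List.pyGetD_of_nonneg _ _ h0, PySem.List.pyGetD_of_nonneg _ _ h0]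
  rw [List.getD_eq_getElem?_getD, List.getD_eq_getElem?_getD,
      List.getElem?_set_ne (by omega)]

lemma prevNonemptyAux_le (lines : List String) (j : Int) : prevNonemptyAux lines j ≤ j := by
  fun_induction prevNonemptyAux lines j with
  | case1 j h ih => omega
  | case2 j h => omega

lemma prevNonemptyAux_set (lines : List String) (k : Nat) (x : String) (j : Int)
    (hj : j < (k : Int)) : prevNonemptyAux (lines.set k x) j = prevNonemptyAux lines j := by
  fun_induction prevNonemptyAux (lines.set k x) j with
  | case1 j h ih =>
      rw [ih (by omega)]
      conv_rhs => rw [prevNonemptyAux]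
      rw [dif_pos ⟨h.1, by rw [← pyGetD_set_lt lines k x j h.1 hj]; exact h.2⟩]
  | case2 j h =>
      conv_rhs => rw [prevNonemptyAux]
      rw [dif_neg (fun hh => h ⟨hh.1, by rw [pyGetD_set_lt lines k x j hh.1 hj]; exact hh.2⟩)]

lemma prevStr_step (L L' : List String) (i : Nat) (x : String)
    (hL' : L' = L ∨ L' = L.set i x) :
    (if PySem.Str.strip (PySem.List.pyGetD L' (i : Int) "") ≠ "" then
       PySem.List.pyGetD L' (i : Int) "" else prevStr L i) = prevStr L' (i + 1) := by
  have hup : (((i + 1 : Nat) : Int)) - 1 = (i : Int) := by push_cast; ring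
  unfold prevStr
  rw [hup]
  conv_rhs => rw [prevNonemptyAux]
  by_cases hc : PySem.Str.strip (PySem.List.pyGetD L' (i : Int) "") = ""
  · rw [if_neg (by simpa using hc), dif_pos ⟨Int.natCast_nonneg i, hc⟩]
    rcases hL' with rfl | rfl
    · rfl
    · rw [prevNonemptyAux_set L i x _ (by omega)]
      have hle := prevNonemptyAux_le L ((i : Int) - 1)
      by_cases h0 : 0 ≤ prevNonemptyAux L ((i : Int) - 1)
      · rw [if_pos h0, if_pos h0, pyGetD_set_lt L i x _ h0 (by omega)]
      · rw [if_neg h0, if_neg h0]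
  · rw [if_pos (by simpa using hc), dif_neg (fun hh => hc hh.2), if_pos (Int.natCast_nonneg i)]

lemma loop_agree : ∀ (fuel cap i : Nat), cap - i ≤ fuel → ∀ (L : List String) (c : Int),
    bLoop cap i L c (prevStr L i) = (aLoop cap i L c).2 := by
  intro fuel
  induction fuel with
  | zero =>
      intro cap i hbound L c
      rw [bLoop, aLoop, if_neg (by omega), if_neg (by omega)]
  | succ n ih =>
      intro cap i hbound L c
      by_cases hi : i < cap
      · rw [bLoop, aLoop, if_pos hi, if_pos hi]
        show bLoop cap (i + 1) (stepB L c i (prevStr L i)).1 (stepB L c i (prevStr L i)).2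
            (if PySem.Str.strip (PySem.List.pyGetD (stepB L c i (prevStr L i)).1 (i : Int) "") ≠ "" then
               PySem.List.pyGetD (stepB L c i (prevStr L i)).1 (i : Int) "" else prevStr L i)
          = (aLoop cap (i + 1) (stepA L c i).1 (stepA L c i).2).2
        rw [step_agree, prevStr_step L (stepA L c i).1 i _ (stepA_fst L c i)]
        exact ih cap (i + 1) (by omega) (stepA L c i).1 (stepA L c i).2
      · rw [bLoop, aLoop, if_neg hi, if_neg hi]

lemma prevStr_zero (L : List String) : prevStr L 0 = "" := by
  unfold prevStr
  rw [prevNonemptyAux]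
  norm_num

-- ===== VERDICT (by name: the statement is the Claim_ definition above) =====
theorem prepass_toplevel_spec : Claim_equal_prepass_toplevel := by
  intro lines _
  unfold Spec_prepass_toplevel prepass_toplevel prepass_toplevel_alt
  rw [← prevStr_zero lines]
  exact (loop_agree (min lines.length 140) (min lines.length 140) 0 (by omega) lines 0).symm
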